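-- pv_equiv track=rewrite | github.com/Shreyas-vgr/bleu | calculatebleu.py | countClip
-- ===== SOURCE A (Python) =====
-- def countClip(candDict, refDict):
--     count = 0
--     for key in candDict.keys():
--         candidateWordCount = candDict[key]
--         maxMatch = 0
--         for reference in refDict:
--             if key in reference:
--                 maxMatch = max(maxMatch, reference[key])
--         candidateWordCount = min(candidateWordCount, maxMatch)
--         count += candidateWordCount
--     return count
-- ===== SOURCE B (Python) =====
-- def countClip(candDict, refDict):
--     # Precompute, in one pass over all references, the max count per word,
--     # then a single O(1)-lookup pass over the candidate counts.
--     best = {}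
--     for reference in refDict:
--         for key, cnt in reference.items():
--             if cnt > best.get(key, 0):
--                 best[key] = cnt
--     total = 0
--     for key, cnt in candDict.items():
--         total += min(cnt, best.get(key, 0))
--     return total
-- ===== Notes on version B (the rewrite author's own statement) =====
-- stated objective: faster
-- what changed: Instead of scanning every reference dict again for each candidate word, B builds a per-word maximum dictionary over all references in one pass and then sums clipped counts with O(1) lookups.
import Mathlib
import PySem

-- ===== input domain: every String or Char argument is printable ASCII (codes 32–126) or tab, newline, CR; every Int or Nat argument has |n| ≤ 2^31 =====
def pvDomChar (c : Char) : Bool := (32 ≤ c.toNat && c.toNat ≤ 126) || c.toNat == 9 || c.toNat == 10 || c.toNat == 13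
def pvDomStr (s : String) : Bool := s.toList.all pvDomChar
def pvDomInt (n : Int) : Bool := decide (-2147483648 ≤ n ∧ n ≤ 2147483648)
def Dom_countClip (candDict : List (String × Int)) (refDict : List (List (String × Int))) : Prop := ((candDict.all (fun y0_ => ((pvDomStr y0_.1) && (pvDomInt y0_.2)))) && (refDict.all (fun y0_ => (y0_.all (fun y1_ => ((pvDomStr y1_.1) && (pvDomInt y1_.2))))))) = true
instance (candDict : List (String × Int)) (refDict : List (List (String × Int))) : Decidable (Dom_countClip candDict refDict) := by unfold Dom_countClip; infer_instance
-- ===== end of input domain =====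

-- B replaces A's rescans of every reference per candidate word by one precomputed
-- per-word maximum dictionary over all references (objective: faster).

-- ===== PORT A =====
-- Literal port of A: for each key of candDict, scan all reference dicts for the
-- max count of that key, clip the candidate count, and accumulate.
-- candDict[key] is ported as getD key 0; the key comes from candDict.keys, so it is present.
def countClip (candDict : List (String × Int)) (refDict : List (List (String × Int))) : Int :=
  let cd := PySem.Dict.ofList candDict
  cd.keys.foldl (fun count key =>
    let candidateWordCount := cd.getD key 0
    let maxMatch := refDict.foldl (fun m reference =>
      let r := PySem.Dict.ofList reference
      if r.contains key then max m (r.getD key 0) else m) 0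
    count + min candidateWordCount maxMatch) 0

-- ===== PORT B =====
-- Literal port of B: one pass over all reference items building the per-word max
-- dict `best`, then one pass over the candidate items summing clipped counts.
def countClip_alt (candDict : List (String × Int)) (refDict : List (List (String × Int))) : Int :=
  let best := refDict.foldl (fun b reference =>
    (PySem.Dict.ofList reference).items.foldl (fun b p =>
      if p.2 > b.getD p.1 0 then b.insert p.1 p.2 else b) b) PySem.Dict.empty
  (PySem.Dict.ofList candDict).items.foldl (fun total p =>
    total + min p.2 (best.getD p.1 0)) 0

-- ===== PRECONDITION & SPEC =====
def Spec_countClip (candDict : List (String × Int)) (refDict : List (List (String × Int))) (out : Int) : Prop := out = countClip_alt candDict refDict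
instance (candDict : List (String × Int)) (refDict : List (List (String × Int))) (out : Int) : Decidable (Spec_countClip candDict refDict out) := by unfold Spec_countClip; infer_instance

-- ===== CLAIM (what is proved, stated in full; the proofs are below) =====
def Claim_equal_countClip : Prop := ∀ (candDict : List (String × Int)) (refDict : List (List (String × Int))), Dom_countClip candDict refDict → Spec_countClip candDict refDict (countClip candDict refDict)

-- ===== LEMMAS AND PROOFS =====

-- getD at k after B's inner fold over a pair list = running max restricted to key k
theorem getD_innerFold (qs : List (String × Int)) (b : PySem.Dict String Int) (k : String) :
    (qs.foldl (fun b p => if p.2 > b.getD p.1 0 then b.insert p.1 p.2 else b) b).getD k 0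
      = qs.foldl (fun m p => if p.1 = k then max m p.2 else m) (b.getD k 0) := by
  induction qs generalizing b with
  | nil => rfl
  | cons p rest ih =>
    simp only [List.foldl_cons, ih]
    congr 1
    by_cases hk : p.1 = k
    · subst hk
      by_cases hgt : p.2 > b.getD p.1 0
      · simp [hgt, PySem.Dict.getD_insert_self, max_eq_right (le_of_lt hgt)]
      · simp [hgt, max_eq_left (le_of_not_gt hgt)]
    · have hk' : ¬ k = p.1 := fun h => hk h.symm
      by_cases hgt : p.2 > b.getD p.1 0
      · simp [hgt, PySem.Dict.getD_insert, hk, hk']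
      · simp [hgt, hk]

-- running-max fold is the identity when no pair carries the key
theorem selMax_not_mem (qs : List (String × Int)) (k : String) (m : Int)
    (h : ∀ p ∈ qs, p.1 ≠ k) :
    qs.foldl (fun m p => if p.1 = k then max m p.2 else m) m = m := by
  induction qs generalizing m with
  | nil => rfl
  | cons p rest ih =>
    have hp : p.1 ≠ k := h p (List.mem_cons_self ..)
    simp only [List.foldl_cons, if_neg hp]
    exact ih m (fun q hq => h q (List.mem_cons_of_mem _ hq))

-- over a nodup-key dict, the running-max fold over its items is A's one-reference step
theorem selMax_dict (r : PySem.Dict String Int) (hnd : r.keys.Nodup) (k : String) (m : Int) :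
    r.items.foldl (fun m p => if p.1 = k then max m p.2 else m) m
      = if r.contains k then max m (r.getD k 0) else m := by
  obtain ⟨l⟩ := r
  induction l generalizing m with
  | nil => simp [PySem.Dict.contains_mk]
  | cons p rest ih =>
    obtain ⟨pk, pv⟩ := p
    have hnd2 : (pk :: rest.map Prod.fst).Nodup := by
      simpa [PySem.Dict.keys_mk] using hnd
    have hnd' : (PySem.Dict.mk rest).keys.Nodup := by
      simpa [PySem.Dict.keys_mk] using hnd2.of_cons
    have hitems : (PySem.Dict.mk ((pk, pv) :: rest)).items = (pk, pv) :: rest := rfl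
    rw [hitems]
    by_cases hk : pk = k
    · have hrest : ∀ q ∈ rest, q.1 ≠ k := by
        intro q hq hqk
        exact (List.nodup_cons.mp hnd2).1 (by rw [hk, ← hqk]; exact List.mem_map_of_mem hq)
      simp only [List.foldl_cons, if_pos hk]
      rw [selMax_not_mem rest k _ hrest]
      have hcont : (PySem.Dict.mk ((pk, pv) :: rest)).contains k = true := by
        rw [PySem.Dict.contains_eq_isSome_get?, PySem.Dict.get?_mk_cons]
        simp [hk]
      have hget : (PySem.Dict.mk ((pk, pv) :: rest)).getD k 0 = pv := by
        simp [PySem.Dict.getD_eq_get?_getD, PySem.Dict.get?_mk_cons, hk]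
      rw [hcont, if_pos rfl, hget]
    · simp only [List.foldl_cons, hk, if_false]
      rw [ih m hnd']
      have hbeq : (pk == k) = false := by simp [hk]
      have hcont : (PySem.Dict.mk ((pk, pv) :: rest)).contains k
          = (PySem.Dict.mk rest).contains k := by
        rw [PySem.Dict.contains_eq_isSome_get?, PySem.Dict.contains_eq_isSome_get?,
            PySem.Dict.get?_mk_cons, hbeq]
        simp
      have hget : (PySem.Dict.mk ((pk, pv) :: rest)).getD k 0
          = (PySem.Dict.mk rest).getD k 0 := by
        simp [PySem.Dict.getD_eq_get?_getD, PySem.Dict.get?_mk_cons, hbeq]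
      rw [hcont, hget]

-- B's `best` dictionary answers, per key, exactly A's scan over the references
theorem getD_best (refs : List (List (String × Int))) (b : PySem.Dict String Int) (k : String) :
    (refs.foldl (fun b reference =>
        (PySem.Dict.ofList reference).items.foldl (fun b p =>
          if p.2 > b.getD p.1 0 then b.insert p.1 p.2 else b) b) b).getD k 0
      = refs.foldl (fun m reference =>
          let r := PySem.Dict.ofList reference
          if r.contains k then max m (r.getD k 0) else m) (b.getD k 0) := by
  induction refs generalizing b with
  | nil => rfl
  | cons ref rest ih =>
    simp only [List.foldl_cons, ih]
    congr 1
    rw [getD_innerFold]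
    exact selMax_dict _ (PySem.Dict.nodup_keys_ofList _) k _

-- ===== VERDICT (by name: the statement is the Claim_ definition above) =====
theorem countClip_spec : Claim_equal_countClip := by
  intro candDict refDict _
  unfold Spec_countClip countClip countClip_alt
  rw [PySem.Dict.items_eq_map_keys (PySem.Dict.ofList candDict)
        (PySem.Dict.nodup_keys_ofList _) 0, List.foldl_map]
  apply List.foldl_ext
  intro total key _
  rw [getD_best refDict PySem.Dict.empty key, PySem.Dict.getD_empty]
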